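-- pv_equiv track=rewrite | github.com/cmartinussen/cmartinussen | AoC2024/Day15.py | parse_warehouse
-- ===== SOURCE A (Python) =====
-- def parse_warehouse(input_data):
--     """
--     Parses the warehouse map and returns the robot position, box positions, and walls.
--     """
--     lines = input_data.strip().splitlines()
--     warehouse = [list(line) for line in lines]
--     robot_pos = None
--     boxes = set()
--     walls = set()
--
--     for y, row in enumerate(warehouse):
--         for x, char in enumerate(row):
--             if char == '@':
--                 robot_pos = (x, y)
--             elif char == 'O':
--                 boxes.add((x, y))
--             elif char == '#':
--                 walls.add((x, y))
--
--     return robot_pos, boxes, walls, len(lines), len(lines[0])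
-- ===== SOURCE B (Python) =====
-- def parse_warehouse(input_data):
--     """
--     Parses the warehouse map and returns the robot position, box positions, and walls.
--     Each output is built by its own comprehension pass over the grid.
--     """
--     lines = input_data.strip().splitlines()
--     walls = {(x, y) for y, row in enumerate(lines) for x, c in enumerate(row) if c == '#'}
--     boxes = {(x, y) for y, row in enumerate(lines) for x, c in enumerate(row) if c == 'O'}
--     ats = [(x, y) for y, row in enumerate(lines) for x, c in enumerate(row) if c == '@']
--     robot_pos = ats[-1] if ats else None
--     return robot_pos, boxes, walls, len(lines), len(lines[0])
-- ===== Notes on version B (the rewrite author's own statement) =====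
-- stated objective: simpler
-- what changed: One fused if/elif accumulator loop over the grid is replaced by three independent comprehension passes (walls, boxes, and the list of '@' positions whose last element is the robot).
import Mathlib
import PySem

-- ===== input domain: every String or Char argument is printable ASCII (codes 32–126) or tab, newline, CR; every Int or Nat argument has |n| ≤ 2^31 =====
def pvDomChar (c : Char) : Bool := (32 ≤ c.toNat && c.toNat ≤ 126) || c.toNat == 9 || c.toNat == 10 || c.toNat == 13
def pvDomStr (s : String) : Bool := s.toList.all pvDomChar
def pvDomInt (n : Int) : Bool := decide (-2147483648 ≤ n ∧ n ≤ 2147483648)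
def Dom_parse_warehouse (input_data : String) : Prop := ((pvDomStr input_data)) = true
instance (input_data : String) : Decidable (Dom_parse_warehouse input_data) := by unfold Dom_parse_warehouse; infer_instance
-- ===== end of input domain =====

-- B replaces A's single fused if/elif accumulator loop by three independent passes
-- (walls, boxes, list of '@' positions with the last one as robot) — objective: simpler.

-- ===== PORT A =====
def parse_warehouse (input_data : String) : (Option (Int × Int)) × (List (Int × Int)) × (List (Int × Int)) × Int × Int :=
  let lines := PySem.Str.splitlines (PySem.Str.strip input_data)
  let warehouse := lines.map String.toList
  let s : Option (Int × Int) × PySem.Set (Int × Int) × PySem.Set (Int × Int) :=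
    (PySem.List.enumerate warehouse 0).foldl (fun s yrow =>
      (PySem.List.enumerate yrow.2 0).foldl (fun s xc =>
        if xc.2 = '@' then (some (xc.1, yrow.1), s.2.1, s.2.2)
        else if xc.2 = 'O' then (s.1, PySem.Set.add s.2.1 (xc.1, yrow.1), s.2.2)
        else if xc.2 = '#' then (s.1, s.2.1, PySem.Set.add s.2.2 (xc.1, yrow.1))
        else s) s)
      (none, PySem.Set.empty, PySem.Set.empty)
  (s.1, s.2.1, s.2.2, (lines.length : Int),
    match PySem.List.pyGet? lines 0 with
    | some l => PySem.Str.len l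
    | none => 0)   -- unreachable under Pre_ (lines[0] raises IndexError in Python)

-- ===== PORT B =====
def parse_warehouse_alt (input_data : String) : (Option (Int × Int)) × (List (Int × Int)) × (List (Int × Int)) × Int × Int :=
  let lines := PySem.Str.splitlines (PySem.Str.strip input_data)
  let walls := PySem.Set.ofList ((PySem.List.enumerate lines 0).flatMap (fun yr =>
      (PySem.List.enumerate yr.2.toList 0).filterMap (fun xc =>
        if xc.2 = '#' then some (xc.1, yr.1) else none)))
  let boxes := PySem.Set.ofList ((PySem.List.enumerate lines 0).flatMap (fun yr =>
      (PySem.List.enumerate yr.2.toList 0).filterMap (fun xc =>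
        if xc.2 = 'O' then some (xc.1, yr.1) else none)))
  let ats := (PySem.List.enumerate lines 0).flatMap (fun yr =>
      (PySem.List.enumerate yr.2.toList 0).filterMap (fun xc =>
        if xc.2 = '@' then some (xc.1, yr.1) else none))
  let robot_pos := ats.getLast?   -- ats[-1] if ats else None
  (robot_pos, boxes, walls, (lines.length : Int),
    match PySem.List.pyGet? lines 0 with
    | some l => PySem.Str.len l
    | none => 0)   -- unreachable under Pre_ (lines[0] raises IndexError in Python)

-- ===== PRECONDITION & SPEC =====
-- Pre_ excludes exactly the inputs that strip to the empty string: there lines == []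
-- and both A and B raise IndexError on lines[0].
def Pre_parse_warehouse (input_data : String) : Prop :=
  PySem.Str.splitlines (PySem.Str.strip input_data) ≠ []
instance (input_data : String) : Decidable (Pre_parse_warehouse input_data) := by
  unfold Pre_parse_warehouse; infer_instance

def pvWitness_parse_warehouse : String := "#@O\n.O@"

def Spec_parse_warehouse (input_data : String) (out : (Option (Int × Int)) × (List (Int × Int)) × (List (Int × Int)) × Int × Int) : Prop := out = parse_warehouse_alt input_data
instance (input_data : String) (out : (Option (Int × Int)) × (List (Int × Int)) × (List (Int × Int)) × Int × Int) : Decidable (Spec_parse_warehouse input_data out) := by unfold Spec_parse_warehouse; infer_instance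

-- ===== CLAIM (what is proved, stated in full; the proofs are below) =====
def Claim_equal_parse_warehouse : Prop := ∀ (input_data : String), Dom_parse_warehouse input_data → Pre_parse_warehouse input_data → Spec_parse_warehouse input_data (parse_warehouse input_data)

-- ===== LEMMAS AND PROOFS =====

-- the '@'/'O'/'#' positions a single enumerated row contributes
def pvSel (ch : Char) (y : Int) (ecs : List (Int × Char)) : List (Int × Int) :=
  ecs.filterMap (fun xc => if xc.2 = ch then some (xc.1, y) else none)

lemma pvLastOr_cons {α : Type} (a : α) (l : List α) (o : Option α) :
    ((a :: l).getLast?).or o = (l.getLast?).or (some a) := by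
  cases l with
  | nil => rfl
  | cons b t =>
    rw [List.getLast?_cons_cons]
    cases h : (b :: t).getLast? with
    | none => simp [List.getLast?_eq_none_iff] at h
    | some v => simp

-- the inner fold of A over one enumerated row, componentwise
lemma pvInner (y : Int) (ecs : List (Int × Char))
    (s : Option (Int × Int) × PySem.Set (Int × Int) × PySem.Set (Int × Int)) :
    ecs.foldl (fun s xc =>
        if xc.2 = '@' then (some (xc.1, y), s.2.1, s.2.2)
        else if xc.2 = 'O' then (s.1, PySem.Set.add s.2.1 (xc.1, y), s.2.2)
        else if xc.2 = '#' then (s.1, s.2.1, PySem.Set.add s.2.2 (xc.1, y))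
        else s) s
      = (((pvSel '@' y ecs).getLast?).or s.1,
         PySem.Set.update s.2.1 (pvSel 'O' y ecs),
         PySem.Set.update s.2.2 (pvSel '#' y ecs)) := by
  induction ecs generalizing s with
  | nil => simp [pvSel, PySem.Set.update]
  | cons xc t ih =>
    by_cases h1 : xc.2 = '@'
    · simp [h1, pvSel, ih, pvLastOr_cons, PySem.Set.update]
    · by_cases h2 : xc.2 = 'O'
      · simp [h2, pvSel, ih, PySem.Set.update]
      · by_cases h3 : xc.2 = '#'
        · simp [h3, pvSel, ih, PySem.Set.update]
        · simp [h1, h2, h3, pvSel, ih]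

-- A's nested fold over the enumerated rows, componentwise
lemma pvOuter (rows : List (Int × List Char))
    (s : Option (Int × Int) × PySem.Set (Int × Int) × PySem.Set (Int × Int)) :
    rows.foldl (fun s yrow =>
        (PySem.List.enumerate yrow.2 0).foldl (fun s xc =>
          if xc.2 = '@' then (some (xc.1, yrow.1), s.2.1, s.2.2)
          else if xc.2 = 'O' then (s.1, PySem.Set.add s.2.1 (xc.1, yrow.1), s.2.2)
          else if xc.2 = '#' then (s.1, s.2.1, PySem.Set.add s.2.2 (xc.1, yrow.1))
          else s) s) s
      = (((rows.flatMap (fun yr => pvSel '@' yr.1 (PySem.List.enumerate yr.2 0))).getLast?).or s.1,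
         PySem.Set.update s.2.1 (rows.flatMap (fun yr => pvSel 'O' yr.1 (PySem.List.enumerate yr.2 0))),
         PySem.Set.update s.2.2 (rows.flatMap (fun yr => pvSel '#' yr.1 (PySem.List.enumerate yr.2 0)))) := by
  induction rows generalizing s with
  | nil => simp [PySem.Set.update]
  | cons r t ih =>
    rw [List.foldl_cons, pvInner, ih]
    simp only [List.flatMap_cons, List.getLast?_append, PySem.Set.update_append, Option.or_assoc]

lemma pvEnumerate_map {α β : Type} (f : α → β) (xs : List α) (s : Int) :
    PySem.List.enumerate (xs.map f) s = (PySem.List.enumerate xs s).map (fun p => (p.1, f p.2)) := by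
  induction xs generalizing s with
  | nil => simp [PySem.List.enumerate_nil]
  | cons x t ih => simp [PySem.List.enumerate_cons, ih]

-- ===== VERDICT (by name: the statement is the Claim_ definition above) =====
theorem parse_warehouse_spec : Claim_equal_parse_warehouse := by
  intro input_data _ _
  show _ = _
  unfold parse_warehouse parse_warehouse_alt
  simp only [pvOuter, pvEnumerate_map, List.flatMap_map, Option.or_none,
    PySem.Set.update, PySem.Set.ofList_eq_foldl, PySem.Set.empty, pvSel]
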